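-- pv_equiv track=rewrite | github.com/qiuyiCode/tolearn | Python/1.7-all-session.py | Ping_pong
-- ===== SOURCE A (Python) =====
-- def num_eights(x):
--     if x == 0:
--       return 0
--     elif x % 10 == 8:
--       return 1 + num_eights(x // 10)
--     else:
--       return num_eights(x // 10)
--
-- def Ping_pong(n):
--   count = 0
--   flag = True
--   for i in range(1,n+1):
--     if num_eights(i) == 0 and i % 8 != 0:
--       if flag == True:
--         count = count + 1
--       else:
--         count = count - 1
--     else:
--       if flag == True:
--         count = count + 1
--       else:
--         count = count - 1
--       flag = not flag
--   return count
-- ===== SOURCE B (Python) =====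
-- def has_eight(x):
--     while x > 0:
--         if x % 10 == 8:
--             return True
--         x //= 10
--     return False
--
-- def Ping_pong(n):
--     if n < 1:
--         return 0
--     specials = []
--     for i in range(1, n + 1):
--         if i % 8 == 0 or has_eight(i):
--             specials.append(i)
--     count = 0
--     sign = 1
--     prev = 0
--     for p in specials:
--         count += sign * (p - prev)
--         sign = -sign
--         prev = p
--     return count + sign * (n - prev)
-- ===== Notes on version B (the rewrite author's own statement) =====
-- stated objective: alternative
-- what changed: A updates an alternating count element-by-element with a flag; B first collects the special positions (divisible by 8 or containing digit 8, via an iterative digit loop that exits at the first 8 instead of A's recursive counter that always scans every digit) and then computes the count as an alternating sum over the segments between consecutive special positions.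
import Mathlib
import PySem

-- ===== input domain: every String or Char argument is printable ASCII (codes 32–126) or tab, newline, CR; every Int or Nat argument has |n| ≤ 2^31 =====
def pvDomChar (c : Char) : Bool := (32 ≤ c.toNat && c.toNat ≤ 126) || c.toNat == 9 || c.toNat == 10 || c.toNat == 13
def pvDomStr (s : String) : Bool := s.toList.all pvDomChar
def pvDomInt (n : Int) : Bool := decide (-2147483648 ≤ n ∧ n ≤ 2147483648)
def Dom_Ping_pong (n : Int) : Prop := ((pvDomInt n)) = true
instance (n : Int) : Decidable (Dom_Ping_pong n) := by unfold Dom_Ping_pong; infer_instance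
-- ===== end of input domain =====

-- B is an alternative two-pass decomposition (collect special positions, then sum alternating segments);
-- same asymptotic cost as A, proved to return identical values.

-- ===== PORT A =====
-- num_eights; the 'x ≤ 0' guard makes the recursion total: Python tests x == 0 and is never
-- called on negatives here (it would not terminate there).
def numEights (x : Int) : Int :=
  if h : x ≤ 0 then 0
  else if PySem.Int.mod x 10 = 8 then 1 + numEights (PySem.Int.floordiv x 10)
  else numEights (PySem.Int.floordiv x 10)
termination_by x.toNat
decreasing_by
  · rw [PySem.Int.floordiv_eq_ediv_of_pos (by omega)]; omega
  · rw [PySem.Int.floordiv_eq_ediv_of_pos (by omega)]; omega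

def pingStep (s : Int × Bool) (i : Int) : Int × Bool :=
  if numEights i = 0 ∧ PySem.Int.mod i 8 ≠ 0 then
    (if s.2 then s.1 + 1 else s.1 - 1, s.2)
  else
    (if s.2 then s.1 + 1 else s.1 - 1, !s.2)

def Ping_pong (n : Int) : Int :=
  ((PySem.List.pyRange 1 (n + 1) 1).foldl pingStep (0, true)).1

-- ===== PORT B =====
-- has_eight: 'while x > 0' loop as recursion (exact; the loop condition is the guard).
def hasEight (x : Int) : Bool :=
  if _h : x ≤ 0 then false
  else if PySem.Int.mod x 10 = 8 then true
  else hasEight (PySem.Int.floordiv x 10)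
termination_by x.toNat
decreasing_by
  rw [PySem.Int.floordiv_eq_ediv_of_pos (by omega)]; omega

def specStep (acc : List Int) (i : Int) : List Int :=
  if PySem.Int.mod i 8 = 0 ∨ hasEight i then acc ++ [i] else acc

def segStep (s : Int × Int × Int) (p : Int) : Int × Int × Int :=
  (s.1 + s.2.1 * (p - s.2.2), -s.2.1, p)

def Ping_pong_alt (n : Int) : Int :=
  if n < 1 then 0
  else
    let specials := (PySem.List.pyRange 1 (n + 1) 1).foldl specStep []
    let s := specials.foldl segStep (0, 1, 0)
    s.1 + s.2.1 * (n - s.2.2)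

-- ===== PRECONDITION & SPEC =====
def Spec_Ping_pong (n : Int) (out : Int) : Prop := out = Ping_pong_alt n
instance (n : Int) (out : Int) : Decidable (Spec_Ping_pong n out) := by unfold Spec_Ping_pong; infer_instance

-- ===== CLAIM (what is proved, stated in full; the proofs are below) =====
def Claim_equal_Ping_pong : Prop := ∀ (n : Int), Dom_Ping_pong n → Spec_Ping_pong n (Ping_pong n)

-- ===== LEMMAS AND PROOFS =====

lemma numEights_nonneg (x : Int) : 0 ≤ numEights x := by
  induction x using numEights.induct with
  | case1 x h => rw [numEights, dif_pos h]
  | case2 x h h8 ih => rw [numEights, dif_neg h, if_pos h8]; omega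
  | case3 x h h8 ih => rw [numEights, dif_neg h, if_neg h8]; exact ih

lemma numEights_zero_iff (x : Int) : numEights x = 0 ↔ hasEight x = false := by
  induction x using numEights.induct with
  | case1 x h => rw [numEights, dif_pos h, hasEight, dif_pos h]; simp
  | case2 x h h8 ih =>
      rw [numEights, dif_neg h, if_pos h8, hasEight, dif_neg h, if_pos h8]
      have := numEights_nonneg (PySem.Int.floordiv x 10)
      simp only [Bool.true_eq_false, iff_false]
      omega
  | case3 x h h8 ih =>
      rw [numEights, dif_neg h, if_neg h8, hasEight, dif_neg h, if_neg h8]; exact ih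

-- the two programs classify each i ≥ 1 identically
lemma cond_iff (i : Int) :
    (numEights i = 0 ∧ PySem.Int.mod i 8 ≠ 0) ↔ ¬ (PySem.Int.mod i 8 = 0 ∨ hasEight i = true) := by
  rw [numEights_zero_iff]
  constructor
  · rintro ⟨h1, h2⟩ (h | h) <;> simp_all
  · intro h; simp only [not_or, Bool.not_eq_true] at h; simp_all

-- proof-side views of the two folds over the processed prefix 1..k
def aSt (k : Nat) : Int × Bool :=
  (PySem.List.pyRange 1 ((k : Int) + 1) 1).foldl pingStep (0, true)

def bSt (k : Nat) : Int × Int × Int :=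
  ((PySem.List.pyRange 1 ((k : Int) + 1) 1).foldl specStep []).foldl segStep (0, 1, 0)

lemma aSt_succ (k : Nat) : aSt (k + 1) = pingStep (aSt k) ((k : Int) + 1) := by
  unfold aSt
  have hcast : (((k + 1 : Nat)) : Int) + 1 = ((k : Int) + 1) + 1 := by push_cast; ring
  rw [hcast, PySem.List.pyRange_one_succ_right (by omega), List.foldl_append]
  simp

lemma bSt_succ (k : Nat) :
    bSt (k + 1) = if PySem.Int.mod ((k : Int) + 1) 8 = 0 ∨ hasEight ((k : Int) + 1)
      then segStep (bSt k) ((k : Int) + 1) else bSt k := by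
  unfold bSt
  have hcast : (((k + 1 : Nat)) : Int) + 1 = ((k : Int) + 1) + 1 := by push_cast; ring
  rw [hcast, PySem.List.pyRange_one_succ_right (by omega), List.foldl_append]
  simp only [List.foldl_cons, List.foldl_nil, specStep]
  split
  · rw [List.foldl_append]; simp
  · rfl

-- main invariant: after processing 1..k, B's segment state reproduces A's (count, flag)
lemma inv (k : Nat) :
    (bSt k).1 + (bSt k).2.1 * ((k : Int) - (bSt k).2.2) = (aSt k).1 ∧
    (bSt k).2.1 = (if (aSt k).2 then 1 else -1) := by
  induction k with
  | zero =>
      unfold aSt bSt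
      rw [show (((0 : Nat)) : Int) + 1 = 1 by norm_num,
        PySem.List.pyRange_one_eq_nil (by omega)]
      norm_num
  | succ k ih =>
      obtain ⟨ih1, ih2⟩ := ih
      have hcast : (((k + 1 : Nat)) : Int) = (k : Int) + 1 := by push_cast; ring
      rw [aSt_succ, bSt_succ, hcast]
      by_cases hc : PySem.Int.mod ((k : Int) + 1) 8 = 0 ∨ hasEight ((k : Int) + 1) = true
      · rw [if_pos hc]
        have hcond : ¬ (numEights ((k : Int) + 1) = 0 ∧ PySem.Int.mod ((k : Int) + 1) 8 ≠ 0) :=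
          fun hcnd => (cond_iff _).mp hcnd hc
        rw [pingStep, if_neg hcond]
        unfold segStep
        rcases hf : (aSt k).2 <;> rw [hf] at ih2 <;> simp [ih2] at ih1 ⊢ <;> omega
      · rw [if_neg hc]
        have hcond : numEights ((k : Int) + 1) = 0 ∧ PySem.Int.mod ((k : Int) + 1) 8 ≠ 0 :=
          (cond_iff _).mpr hc
        rw [pingStep, if_pos hcond]
        rcases hf : (aSt k).2 <;> rw [hf] at ih2 <;> simp [ih2] at ih1 ⊢ <;> omega

-- ===== VERDICT (by name: the statement is the Claim_ definition above) =====
theorem Ping_pong_spec : Claim_equal_Ping_pong := by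
  intro n _
  unfold Spec_Ping_pong Ping_pong Ping_pong_alt
  by_cases hn : n < 1
  · rw [if_pos hn, PySem.List.pyRange_one_eq_nil (by omega)]
    simp
  · rw [if_neg hn]
    have hk : ((n.toNat : Int)) = n := Int.toNat_of_nonneg (by omega)
    obtain ⟨h1, _⟩ := inv n.toNat
    unfold aSt bSt at h1
    rw [hk] at h1
    simp only []
    omega
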